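-- pv_equiv track=rewrite | github.com/shubhamiit9162/Air_quality_samulation_with_multiple_models | api_client.py | generate_prediction_scenarios
-- ===== SOURCE A (Python) =====
-- from typing import Dict, List, Optional, Union
--
-- def generate_prediction_scenarios(base_features: Dict,
--                                 variable_ranges: Dict) -> List[Dict]:
--     """
--     Generate prediction scenarios by varying specific features
--
--     Args:
--         base_features: Base feature set
--         variable_ranges: Dictionary of features to vary and their ranges
--
--     Returns:
--         List of feature scenarios
--     """
--     import itertools
--
--     scenarios = []
--
--     # Create all combinations of variable ranges
--     keys = list(variable_ranges.keys())
--     values = list(variable_ranges.values())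
--
--     for combination in itertools.product(*values):
--         scenario = base_features.copy()
--
--         for i, key in enumerate(keys):
--             scenario[key] = combination[i]
--
--         scenarios.append(scenario)
--
--     return scenarios
-- ===== SOURCE B (Python) =====
-- def generate_prediction_scenarios(base_features, variable_ranges):
--     scenarios = [base_features.copy()]
--     for key, values in variable_ranges.items():
--         scenarios = [{**s, key: v} for s in scenarios for v in values]
--     return scenarios
-- ===== Notes on version B (the rewrite author's own statement) =====
-- stated objective: simpler
-- what changed: Replaces itertools.product over the value lists plus a per-combination indexed key-assignment loop by a single running-list expansion: each key's range multiplies the current list of partial scenarios in one comprehension.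
import Mathlib
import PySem

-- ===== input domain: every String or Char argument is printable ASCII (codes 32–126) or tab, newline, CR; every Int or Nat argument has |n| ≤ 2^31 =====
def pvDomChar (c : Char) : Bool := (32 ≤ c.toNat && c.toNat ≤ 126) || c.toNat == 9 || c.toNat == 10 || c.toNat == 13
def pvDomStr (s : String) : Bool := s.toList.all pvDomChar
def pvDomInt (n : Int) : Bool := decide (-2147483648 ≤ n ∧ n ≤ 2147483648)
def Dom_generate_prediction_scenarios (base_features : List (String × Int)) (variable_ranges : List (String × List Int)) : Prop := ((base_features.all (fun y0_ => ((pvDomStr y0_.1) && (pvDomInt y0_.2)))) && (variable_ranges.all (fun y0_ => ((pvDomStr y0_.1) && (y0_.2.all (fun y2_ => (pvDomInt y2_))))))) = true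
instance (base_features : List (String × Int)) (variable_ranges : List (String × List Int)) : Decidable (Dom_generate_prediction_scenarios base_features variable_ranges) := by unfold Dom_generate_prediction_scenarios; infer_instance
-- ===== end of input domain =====

-- B replaces itertools.product + an indexed assignment loop by a running-list expansion
-- (one comprehension per key), a simpler decomposition of the same Cartesian build.

-- Python dict assignment d[k] = v on an association list: overwrite in place, append if new (exact).
def pyInsert (d : List (String × Int)) (k : String) (v : Int) : List (String × Int) :=
  match d with
  | [] => [(k, v)]
  | (k', v') :: rest => if k' == k then (k, v) :: rest else (k', v') :: pyInsert rest k v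

-- ===== PORT A =====
-- itertools.product(*values), ported by hand (exact: first list varies slowest).
def pyProduct (values : List (List Int)) : List (List Int) :=
  match values with
  | [] => [[]]
  | vs :: rest => vs.flatMap (fun v => (pyProduct rest).map (fun c => v :: c))

def generate_prediction_scenarios (base_features : List (String × Int)) (variable_ranges : List (String × List Int)) : List (List (String × Int)) :=
  let keys := variable_ranges.map Prod.fst
  let values := variable_ranges.map Prod.snd
  (pyProduct values).foldl
    (fun scenarios combination =>
      scenarios ++ [(keys.zip combination).foldl (fun sc kv => pyInsert sc kv.1 kv.2) base_features])
    []

-- ===== PORT B =====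
def generate_prediction_scenarios_alt (base_features : List (String × Int)) (variable_ranges : List (String × List Int)) : List (List (String × Int)) :=
  variable_ranges.foldl
    (fun scenarios kv => scenarios.flatMap (fun s => kv.2.map (fun v => pyInsert s kv.1 v)))
    [base_features]

-- ===== PRECONDITION & SPEC =====
def Spec_generate_prediction_scenarios (base_features : List (String × Int)) (variable_ranges : List (String × List Int)) (out : List (List (String × Int))) : Prop := out = generate_prediction_scenarios_alt base_features variable_ranges
instance (base_features : List (String × Int)) (variable_ranges : List (String × List Int)) (out : List (List (String × Int))) : Decidable (Spec_generate_prediction_scenarios base_features variable_ranges out) := by unfold Spec_generate_prediction_scenarios; infer_instance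

-- ===== CLAIM (what is proved, stated in full; the proofs are below) =====
def Claim_equal_generate_prediction_scenarios : Prop := ∀ (base_features : List (String × Int)) (variable_ranges : List (String × List Int)), Dom_generate_prediction_scenarios base_features variable_ranges → Spec_generate_prediction_scenarios base_features variable_ranges (generate_prediction_scenarios base_features variable_ranges)

-- ===== LEMMAS AND PROOFS =====

-- A's append-to-accumulator loop is a map.
theorem foldl_push {α β : Type} (f : α → β) : ∀ (xs : List α) (acc : List β),
    xs.foldl (fun a x => a ++ [f x]) acc = acc ++ xs.map f := by
  intro xs
  induction xs with
  | nil => simp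
  | cons x xs ih => intro acc; simp [List.foldl, ih]

-- Characterisation of A as a map over the product.
theorem A_char (base : List (String × Int)) (ranges : List (String × List Int)) :
    generate_prediction_scenarios base ranges =
      (pyProduct (ranges.map Prod.snd)).map
        (fun c => ((ranges.map Prod.fst).zip c).foldl (fun sc kv => pyInsert sc kv.1 kv.2) base) := by
  unfold generate_prediction_scenarios
  rw [foldl_push]
  simp

-- A peels off the first key as a flatMap.
theorem A_cons (base : List (String × Int)) (k : String) (vs : List Int)
    (rest : List (String × List Int)) :
    generate_prediction_scenarios base ((k, vs) :: rest) =
      vs.flatMap (fun v => generate_prediction_scenarios (pyInsert base k v) rest) := by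
  rw [A_char]
  simp only [List.map_cons, pyProduct, List.map_flatMap, List.map_map]
  refine List.flatMap_congr (fun v _ => ?_)
  rw [A_char]
  simp [Function.comp, List.zip]

-- B's fold from any scenario list splits over the scenarios.
theorem B_split (ranges : List (String × List Int)) : ∀ (scs : List (List (String × Int))),
    ranges.foldl (fun scenarios kv => scenarios.flatMap (fun s => kv.2.map (fun v => pyInsert s kv.1 v))) scs =
      scs.flatMap (fun s =>
        ranges.foldl (fun scenarios kv => scenarios.flatMap (fun s => kv.2.map (fun v => pyInsert s kv.1 v))) [s]) := by
  induction ranges with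
  | nil => intro scs; simp
  | cons p rest ih =>
    intro scs
    simp only [List.foldl_cons]
    rw [ih]
    refine Eq.trans ?_ (List.flatMap_congr (fun s _ => (ih _).symm))
    simp [List.flatMap_assoc]

-- B peels off the first key as a flatMap.
theorem B_cons (base : List (String × Int)) (k : String) (vs : List Int)
    (rest : List (String × List Int)) :
    generate_prediction_scenarios_alt base ((k, vs) :: rest) =
      vs.flatMap (fun v => generate_prediction_scenarios_alt (pyInsert base k v) rest) := by
  unfold generate_prediction_scenarios_alt
  simp only [List.foldl_cons]
  rw [B_split]
  simp [List.flatMap_map]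

-- ===== VERDICT (by name: the statement is the Claim_ definition above) =====
theorem generate_prediction_scenarios_spec : Claim_equal_generate_prediction_scenarios := by
  intro base ranges hdom
  unfold Spec_generate_prediction_scenarios
  clear hdom
  induction ranges generalizing base with
  | nil => simp [generate_prediction_scenarios, generate_prediction_scenarios_alt, pyProduct]
  | cons p rest ih =>
    rw [← p.eta, A_cons, B_cons]
    exact List.flatMap_congr (fun v _ => ih _)
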